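-- pv_equiv track=rewrite | github.com/virenderox/LeetCode-Problem | Hashmap/Equivalent Sub-Arrays/equal.py | AtmostKUniqueChar
-- ===== SOURCE A (Python) =====
-- def AtmostKUniqueChar(s,k):
--
--     ans = distinctCount = release = 0
--
--     memo = {}
--
--     lenS = len(s)
--     for val in range(lenS):
--
--         accquire = s[val]
--         if accquire in memo:
--             memo[accquire] += 1
--
--         else:
--             distinctCount += 1
--             memo[accquire] = 1
--
--
--         while release <= val and distinctCount > k:
--
--             disChar = s[release]
--             memo[disChar] -= 1
--
--             release += 1
--
--             if memo[disChar] == 0: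
--                 del memo[disChar]
--                 distinctCount -= 1
--
--
--         ans += (val - release + 1)
--
--     return ans
-- ===== SOURCE B (Python) =====
-- def AtmostKUniqueChar(s, k):
--     # Brute force: for each end index j, scan backwards collecting distinct
--     # chars in a set; stop as soon as the window's distinct count exceeds k.
--     ans = 0
--     for j in range(len(s)):
--         seen = set()
--         i = j
--         while i >= 0:
--             seen.add(s[i])
--             if len(seen) > k:
--                 break
--             ans += 1
--             i -= 1
--     return ans
-- ===== Notes on version B (the rewrite author's own statement) =====
-- stated objective: alternative
-- what changed: Replaces the O(n) two-pointer sliding window with counter dict by a brute-force double loop: for each end index scan backwards with a fresh set of distinct chars, stopping once the count would exceed k.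
import Mathlib
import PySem

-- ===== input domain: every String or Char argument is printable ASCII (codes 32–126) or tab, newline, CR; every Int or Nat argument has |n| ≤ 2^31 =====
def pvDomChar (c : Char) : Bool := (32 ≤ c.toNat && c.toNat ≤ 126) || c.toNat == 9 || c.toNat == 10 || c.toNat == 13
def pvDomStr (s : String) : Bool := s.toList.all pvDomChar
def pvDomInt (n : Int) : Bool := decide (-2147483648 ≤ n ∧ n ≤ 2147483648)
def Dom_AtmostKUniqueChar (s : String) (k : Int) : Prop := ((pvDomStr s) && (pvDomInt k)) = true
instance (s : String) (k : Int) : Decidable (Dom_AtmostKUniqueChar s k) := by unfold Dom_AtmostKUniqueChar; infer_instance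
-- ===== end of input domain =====

-- B replaces A's sliding window by a brute-force per-end backward scan with a set (alternative decomposition, not faster).

-- ===== PORT A =====
-- A's inner `while release <= val and distinctCount > k` loop; fuel = (val + 1 - release).toNat
-- is always sufficient (release grows by 1 each pass and the loop needs release ≤ val), so the
-- fuel never cuts the loop short and the recursion is a faithful rendering of the while loop.
def pvAWhile (s : String) (k : Int) (val : Int) :
    Nat → Int → Int → PySem.Dict Char Int → Int × Int × PySem.Dict Char Int
  | 0, dc, rel, memo => (dc, rel, memo)
  | fuel+1, dc, rel, memo =>
    if rel ≤ val ∧ k < dc then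
      -- disChar = s[release]  (always in range here)
      let dis := (PySem.Str.pyGet? s rel).getD ' '
      let memo1 := memo.insert dis (memo.getD dis 0 - 1)   -- memo[disChar] -= 1
      let rel1 := rel + 1                                   -- release += 1
      if memo1.getD dis 0 = 0 then
        pvAWhile s k val fuel (dc - 1) rel1 (memo1.erase dis)  -- del memo[disChar]; distinctCount -= 1
      else
        pvAWhile s k val fuel dc rel1 memo1
    else (dc, rel, memo)

def AtmostKUniqueChar (s : String) (k : Int) : Int :=
  let lenS : Int := PySem.Str.len s
  let st := (PySem.List.pyRange 0 lenS 1).foldl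
    (fun (st : Int × Int × Int × PySem.Dict Char Int) val =>
      let ans := st.1; let dc := st.2.1; let rel := st.2.2.1; let memo := st.2.2.2
      -- accquire = s[val]  (val ∈ range(len(s)): always in range)
      let acq := (PySem.Str.pyGet? s val).getD ' '
      let p : Int × PySem.Dict Char Int :=
        if memo.contains acq then (dc, memo.insert acq (memo.getD acq 0 + 1))
        else (dc + 1, memo.insert acq 1)
      let r := pvAWhile s k val (val + 1 - rel).toNat p.1 rel p.2
      (ans + (val - r.2.1 + 1), r.1, r.2.1, r.2.2))
    (0, 0, 0, PySem.Dict.empty)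
  st.1

-- ===== PORT B =====
-- B's inner `while i >= 0` backward scan; fuel = (i + 1).toNat is always sufficient
-- (i drops by 1 each pass and the loop needs 0 ≤ i), so the recursion renders the while loop.
def pvBWhile (s : String) (k : Int) : Nat → Int → PySem.Set Char → Int
  | 0, _, _ => 0
  | fuel+1, i, seen =>
    if 0 ≤ i then
      let seen1 := seen.add ((PySem.Str.pyGet? s i).getD ' ')   -- seen.add(s[i]); i in range here
      if k < PySem.Set.len seen1 then 0                          -- break
      else 1 + pvBWhile s k fuel (i - 1) seen1                   -- ans += 1; i -= 1
    else 0

def AtmostKUniqueChar_alt (s : String) (k : Int) : Int :=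
  (PySem.List.pyRange 0 (PySem.Str.len s) 1).foldl
    (fun ans j => ans + pvBWhile s k (j + 1).toNat j PySem.Set.empty) 0

-- ===== PRECONDITION & SPEC =====
def Spec_AtmostKUniqueChar (s : String) (k : Int) (out : Int) : Prop := out = AtmostKUniqueChar_alt s k
instance (s : String) (k : Int) (out : Int) : Decidable (Spec_AtmostKUniqueChar s k out) := by unfold Spec_AtmostKUniqueChar; infer_instance

-- ===== CLAIM (what is proved, stated in full; the proofs are below) =====
def Claim_equal_AtmostKUniqueChar : Prop := ∀ (s : String) (k : Int), Dom_AtmostKUniqueChar s k → Spec_AtmostKUniqueChar s k (AtmostKUniqueChar s k)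

-- ===== LEMMAS AND PROOFS =====

-- window s[r:e] as a list of chars
def pvSL (cs : List Char) (r e : Nat) : List Char := (cs.take e).drop r
-- number of distinct chars
def pvND (l : List Char) : Nat := l.toFinset.card
-- number of valid window starts for the window ending at e-1
def pvCnt (cs : List Char) (k : Int) (e : Nat) : Nat :=
  (List.range e).countP (fun r => decide ((pvND (pvSL cs r e) : Int) ≤ k))
-- the common reference value: total count over all end positions < m
def pvSum (cs : List Char) (k : Int) (m : Nat) : Int :=
  ((List.range m).map (fun v => (pvCnt cs k (v+1) : Int))).sum

theorem pvSum_succ (cs : List Char) (k : Int) (m : Nat) :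
    pvSum cs k (m+1) = pvSum cs k m + (pvCnt cs k (m+1) : Int) := by
  simp [pvSum, List.range_succ]

theorem pvSL_self (cs : List Char) (e : Nat) : pvSL cs e e = [] := by
  apply List.drop_eq_nil_of_le; simp

theorem pvND_mono {l l' : List Char} (h : l ⊆ l') : pvND l ≤ pvND l' := by
  apply Finset.card_le_card; intro x hx; simp only [List.mem_toFinset] at *; exact h hx

theorem pvSL_subset_left (cs : List Char) {r r' : Nat} (e : Nat) (h : r' ≤ r) :
    pvSL cs r e ⊆ pvSL cs r' e := by
  unfold pvSL
  rw [show r = r' + (r - r') by omega, ← List.drop_drop]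
  exact List.drop_subset _ _

theorem pvSL_succ_right (cs : List Char) {r e : Nat} (h1 : r ≤ e) (h2 : e < cs.length) :
    pvSL cs r (e+1) = pvSL cs r e ++ [cs[e]] := by
  unfold pvSL
  rw [List.take_add_one, List.getElem?_eq_getElem h2]
  rw [List.drop_append_of_le_length (by simp; omega)]
  rfl

theorem pvSL_cons (cs : List Char) {r e : Nat} (h1 : r < e) (h2 : r < cs.length) :
    pvSL cs r e = cs[r] :: pvSL cs (r+1) e := by
  unfold pvSL
  rw [List.drop_eq_getElem_cons (by simp; omega)]
  congr 1
  exact List.getElem_take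

theorem pvToFinset_append (l : List Char) (c : Char) :
    (l ++ [c]).toFinset = insert c l.toFinset := by
  ext x; simp

theorem pvND_append_mem {l : List Char} {c : Char} (h : c ∈ l) : pvND (l ++ [c]) = pvND l := by
  simp [pvND, Finset.insert_eq_self.mpr (List.mem_toFinset.mpr h)]

theorem pvND_append_not_mem {l : List Char} {c : Char} (h : c ∉ l) : pvND (l ++ [c]) = pvND l + 1 := by
  simp only [pvND, pvToFinset_append]
  exact Finset.card_insert_of_notMem (by simpa using h)

theorem pvND_cons_mem {l : List Char} {c : Char} (h : c ∈ l) : pvND (c :: l) = pvND l := by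
  simp [pvND, List.toFinset_cons, Finset.insert_eq_self.mpr (List.mem_toFinset.mpr h)]

theorem pvND_cons_not_mem {l : List Char} {c : Char} (h : c ∉ l) : pvND (c :: l) = pvND l + 1 := by
  simp [pvND, List.toFinset_cons]
  exact Finset.card_insert_of_notMem (by simpa using h)

-- memo models the multiset of chars of l
def pvMSpec (memo : PySem.Dict Char Int) (l : List Char) : Prop :=
  ∀ c, memo.get? c = if 0 < l.count c then some ((l.count c : Int)) else none

theorem pvGet?_erase (d : PySem.Dict Char Int) (x y : Char) :
    (d.erase x).get? y = if y = x then none else d.get? y := by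
  obtain ⟨items⟩ := d
  simp only [PySem.Dict.erase, PySem.Dict.get?]
  induction items with
  | nil => simp
  | cons p rest ih =>
    by_cases hx : p.1 = x <;> by_cases hy : p.1 = y <;> simp_all

theorem pvMSpec_contains {memo : PySem.Dict Char Int} {l : List Char} (h : pvMSpec memo l) (c : Char) :
    memo.contains c = decide (c ∈ l) := by
  rw [PySem.Dict.contains_eq_isSome_get?, h c]
  by_cases hc : c ∈ l
  · simp [List.count_pos_iff.mpr hc, hc]
  · simp [hc, List.count_eq_zero.mpr hc]

theorem pvMSpec_getD {memo : PySem.Dict Char Int} {l : List Char} (h : pvMSpec memo l) (c : Char) (hc : c ∈ l) :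
    memo.getD c 0 = (l.count c : Int) := by
  simp [PySem.Dict.getD, h c, List.count_pos_iff.mpr hc]

-- countP of a threshold predicate over range
theorem pvCountP_range_ge (e R : Nat) (hR : R ≤ e) :
    (List.range e).countP (fun r => decide (R ≤ r)) = e - R := by
  induction e with
  | zero => simp
  | succ e ih =>
    rw [List.range_succ, List.countP_append]
    rcases Nat.eq_or_lt_of_le hR with heq | hlt
    · have hz : (List.range e).countP (fun r => decide (R ≤ r)) = 0 :=
        List.countP_eq_zero.mpr (by intro r hr; simp at hr ⊢; omega)
      rw [hz]; simp [Nat.not_le.mpr (by omega : e < R)]; omega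
    · have hR' : R ≤ e := by omega
      rw [ih hR']; simp [hR']; omega

-- Str.pyGet? at a nonneg in-range index
theorem pvStrGet (s : String) (m : Nat) (h : m < s.toList.length) :
    (PySem.Str.pyGet? s (m : Int)).getD ' ' = s.toList[m] := by
  simp [PySem.Str.pyGet?, PySem.List.pyGet?_natCast, List.getElem?_eq_getElem h]

-- ===== B side =====

theorem pvSet_add_toFinset (seen : PySem.Set Char) (c : Char) :
    (PySem.Set.add seen c).toFinset = insert c seen.toFinset := by
  simp only [PySem.Set.add, PySem.Set.contains]
  split_ifs with h
  · simp at h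
    ext x
    simp only [List.mem_toFinset, Finset.mem_insert]
    constructor
    · tauto
    · rintro (rfl | hx) <;> [exact h; exact hx]
  · ext x; simp

theorem pvSet_add_nodup {seen : PySem.Set Char} (h : seen.Nodup) (c : Char) :
    (PySem.Set.add seen c).Nodup := by
  simp only [PySem.Set.add, PySem.Set.contains]
  split_ifs with hc
  · exact h
  · simp at hc
    rw [List.nodup_append]
    refine ⟨h, List.nodup_singleton c, ?_⟩
    intro a ha b hb
    have hb' : b = c := by simpa using hb
    subst hb'
    exact fun h' => hc (h' ▸ ha)

theorem pvBWhile_eq (s : String) (k : Int) (e : Nat) (he : e ≤ s.toList.length) :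
    ∀ (m : Nat) (seen : PySem.Set Char), m ≤ e → seen.Nodup →
      seen.toFinset = (pvSL s.toList m e).toFinset →
      pvBWhile s k m ((m : Int) - 1) seen =
        ((List.range m).countP (fun r => decide ((pvND (pvSL s.toList r e) : Int) ≤ k)) : Int) := by
  intro m
  induction m with
  | zero => intro seen _ _ _; simp [pvBWhile]
  | succ m ih =>
    intro seen hme hnd hfs
    have hmlt : m < e := by omega
    have hml : m < s.toList.length := lt_of_lt_of_le hmlt he
    have hidx : ((m + 1 : Nat) : Int) - 1 = (m : Int) := by push_cast; omega
    have hget : (PySem.Str.pyGet? s (((m + 1 : Nat) : Int) - 1)).getD ' ' = s.toList[m] := by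
      rw [hidx]; exact pvStrGet s m hml
    have hcons : pvSL s.toList m e = s.toList[m] :: pvSL s.toList (m+1) e :=
      pvSL_cons s.toList hmlt hml
    set seen1 := PySem.Set.add seen ((PySem.Str.pyGet? s (((m + 1 : Nat) : Int) - 1)).getD ' ') with hseen1
    have hfs1 : seen1.toFinset = (pvSL s.toList m e).toFinset := by
      rw [hseen1, hget, pvSet_add_toFinset, hfs, hcons]
      simp
    have hnd1 : seen1.Nodup := by rw [hseen1]; exact pvSet_add_nodup hnd _
    have hlen : PySem.Set.len seen1 = (pvND (pvSL s.toList m e) : Int) := by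
      have := List.toFinset_card_of_nodup hnd1
      simp only [PySem.Set.len, pvND, ← hfs1, this]
    show (if (0 : Int) ≤ ((m + 1 : Nat) : Int) - 1 then _ else _) = _
    rw [if_pos (by push_cast; omega)]
    simp only [← hseen1, hlen]
    by_cases hk : k < (pvND (pvSL s.toList m e) : Int)
    · rw [if_pos hk]
      have hz : (List.range (m+1)).countP (fun r => decide ((pvND (pvSL s.toList r e) : Int) ≤ k)) = 0 := by
        apply List.countP_eq_zero.mpr
        intro r hr
        simp only [List.mem_range] at hr
        have hsub : pvND (pvSL s.toList m e) ≤ pvND (pvSL s.toList r e) :=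
          pvND_mono (pvSL_subset_left s.toList e (by omega))
        simp only [decide_eq_true_eq, Int.not_le]
        exact lt_of_lt_of_le hk (by exact_mod_cast hsub)
      rw [hz]; simp
    · rw [if_neg hk, hidx]
      rw [ih seen1 (by omega) hnd1 hfs1]
      have : (List.range (m+1)).countP (fun r => decide ((pvND (pvSL s.toList r e) : Int) ≤ k)) =
          (List.range m).countP (fun r => decide ((pvND (pvSL s.toList r e) : Int) ≤ k)) + 1 := by
        rw [List.range_succ, List.countP_append]
        simp [Int.not_lt.mp hk]
      rw [this]; push_cast; ring

-- ===== A side =====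

theorem pvAWhile_eq (s : String) (k : Int) (v : Nat) (hv : v < s.toList.length) :
    ∀ (fuel : Nat) (dc : Int) (R : Nat) (memo : PySem.Dict Char Int),
      R ≤ v + 1 → fuel = (v + 1) - R →
      dc = (pvND (pvSL s.toList R (v+1)) : Int) →
      pvMSpec memo (pvSL s.toList R (v+1)) →
      (R = 0 ∨ k < (pvND (pvSL s.toList (R-1) (v+1)) : Int)) →
      ∃ R' : Nat,
        pvAWhile s k (v : Int) fuel dc (R : Int) memo =
          ((pvND (pvSL s.toList R' (v+1)) : Int), (R' : Int),
            (pvAWhile s k (v : Int) fuel dc (R : Int) memo).2.2) ∧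
        R' ≤ v + 1 ∧
        pvMSpec (pvAWhile s k (v : Int) fuel dc (R : Int) memo).2.2 (pvSL s.toList R' (v+1)) ∧
        ((pvND (pvSL s.toList R' (v+1)) : Int) ≤ k ∨ R' = v + 1) ∧
        (R' = 0 ∨ k < (pvND (pvSL s.toList (R'-1) (v+1)) : Int)) := by
  intro fuel
  induction fuel with
  | zero =>
    intro dc R memo hR hfuel hdc hms hmin
    have hRv : R = v + 1 := by omega
    refine ⟨R, ?_, by omega, ?_, Or.inr hRv, hmin⟩
    · simp [pvAWhile, hdc]
    · simpa [pvAWhile] using hms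
  | succ fuel ih =>
    intro dc R memo hR hfuel hdc hms hmin
    have hRv : R ≤ v := by omega
    have hRl : R < s.toList.length := lt_of_le_of_lt hRv hv
    by_cases hk : k < dc
    · -- loop body runs
      have hcond : ((R : Int) ≤ (v : Int) ∧ k < dc) := ⟨by exact_mod_cast hRv, hk⟩
      have hget : (PySem.Str.pyGet? s (R : Int)).getD ' ' = s.toList[R] := pvStrGet s R hRl
      have hcons : pvSL s.toList R (v+1) = s.toList[R] :: pvSL s.toList (R+1) (v+1) :=
        pvSL_cons s.toList (by omega) hRl
      set dis := s.toList[R] with hdis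
      set t := pvSL s.toList (R+1) (v+1) with ht
      have hcnt_cur : (pvSL s.toList R (v+1)).count dis = t.count dis + 1 := by
        rw [hcons]; simp
      have hgetD : memo.getD dis 0 = ((pvSL s.toList R (v+1)).count dis : Int) :=
        pvMSpec_getD hms dis (by rw [hcons]; exact List.mem_cons_self)
      set memo1 := memo.insert dis (memo.getD dis 0 - 1) with hmemo1
      have hget1 : memo1.get? dis = some ((t.count dis : Int)) := by
        rw [hmemo1, PySem.Dict.get?_insert_self, hgetD, hcnt_cur]; push_cast; ring_nf
      have hgetD1 : memo1.getD dis 0 = ((t.count dis : Int)) := by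
        simp [PySem.Dict.getD, hget1]
      have hget1' : ∀ c, c ≠ dis → memo1.get? c = memo.get? c := by
        intro c hc
        rw [hmemo1, PySem.Dict.get?_insert_of_ne _ _ hc]
      have hcount_ne : ∀ c, c ≠ dis → (pvSL s.toList R (v+1)).count c = t.count c := by
        intro c hc
        rw [hcons]; simp [Ne.symm hc]
      have hmin' : (R + 1 = 0 ∨ k < (pvND (pvSL s.toList ((R+1)-1) (v+1)) : Int)) := by
        right
        simpa using hdc ▸ hk
      have hcast : ((R : Int) + 1) = ((R + 1 : Nat) : Int) := by push_cast; ring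
      -- unfold one loop iteration
      by_cases hzero : t.count dis = 0
      · have hnotmem : dis ∉ t := List.count_eq_zero.mp hzero
        have hdc' : dc - 1 = (pvND t : Int) := by
          rw [hdc, hcons, pvND_cons_not_mem hnotmem]; push_cast; ring
        have hms' : pvMSpec (memo1.erase dis) t := by
          intro c
          by_cases hc : c = dis
          · subst hc
            rw [pvGet?_erase, if_pos rfl, hzero]
            simp
          · rw [pvGet?_erase, if_neg hc, hget1' c hc, hms c, hcount_ne c hc]
        have hstep : pvAWhile s k (v : Int) (fuel+1) dc (R : Int) memo =
            pvAWhile s k (v : Int) fuel (dc - 1) ((R+1 : Nat) : Int) (memo1.erase dis) := by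
          rw [pvAWhile, if_pos hcond]
          simp only [hget, ← hmemo1]
          rw [if_pos (by rw [hgetD1, hzero]; simp), hcast]
        rw [hstep]
        exact ih (dc - 1) (R+1) (memo1.erase dis) (by omega) (by omega) hdc' hms' hmin'
      · have hmem : dis ∈ t := List.count_pos_iff.mp (by omega)
        have hdc' : dc = (pvND t : Int) := by
          rw [hdc, hcons, pvND_cons_mem hmem]
        have hms' : pvMSpec memo1 t := by
          intro c
          by_cases hc : c = dis
          · subst hc
            rw [hget1, if_pos (by omega)]
          · rw [hget1' c hc, hms c, hcount_ne c hc]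
        have hstep : pvAWhile s k (v : Int) (fuel+1) dc (R : Int) memo =
            pvAWhile s k (v : Int) fuel dc ((R+1 : Nat) : Int) memo1 := by
          rw [pvAWhile, if_pos hcond]
          simp only [hget, ← hmemo1]
          rw [if_neg (by rw [hgetD1]; exact_mod_cast hzero), hcast]
        rw [hstep]
        exact ih dc (R+1) memo1 (by omega) (by omega) hdc' hms' hmin'
    · -- loop exits immediately
      refine ⟨R, ?_, hR, ?_, Or.inl (hdc ▸ le_of_not_gt hk), hmin⟩
      · simp only [pvAWhile]
        rw [if_neg (by intro h; exact hk h.2), hdc]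
      · simp only [pvAWhile]
        rw [if_neg (by intro h; exact hk h.2)]
        exact hms

-- the contribution of iteration v equals pvCnt
theorem pvContrib (cs : List Char) (k : Int) (v : Nat) (R' : Nat) (hR' : R' ≤ v + 1)
    (hle : (pvND (pvSL cs R' (v+1)) : Int) ≤ k ∨ R' = v + 1)
    (hmin : R' = 0 ∨ k < (pvND (pvSL cs (R'-1) (v+1)) : Int)) :
    ((v : Int) - (R' : Int) + 1) = (pvCnt cs k (v+1) : Int) := by
  unfold pvCnt
  have hcong : ∀ r ∈ List.range (v+1),
      (decide ((pvND (pvSL cs r (v+1)) : Int) ≤ k)) = (decide (R' ≤ r)) := by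
    intro r hr
    simp only [List.mem_range] at hr
    rw [decide_eq_decide]
    constructor
    · intro hp
      by_contra hnot
      have h1 : 1 ≤ R' := by omega
      rcases hmin with rfl | hmin
      · omega
      · have hsub : pvND (pvSL cs (R'-1) (v+1)) ≤ pvND (pvSL cs r (v+1)) :=
          pvND_mono (pvSL_subset_left cs (v+1) (by omega))
        have : k < (pvND (pvSL cs r (v+1)) : Int) :=
          lt_of_lt_of_le hmin (by exact_mod_cast hsub)
        omega
    · intro hge
      rcases hle with hle | rfl
      · have hsub : pvND (pvSL cs r (v+1)) ≤ pvND (pvSL cs R' (v+1)) :=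
          pvND_mono (pvSL_subset_left cs (v+1) hge)
        calc (pvND (pvSL cs r (v+1)) : Int) ≤ (pvND (pvSL cs R' (v+1)) : Int) := by exact_mod_cast hsub
          _ ≤ k := hle
      · omega
  rw [List.countP_congr (fun x hx => by rw [hcong x hx]), pvCountP_range_ge (v+1) R' hR']
  omega

-- A's outer fold invariant
theorem pvAFold (s : String) (k : Int) :
    ∀ (m : Nat), m ≤ s.toList.length →
      ∃ (R : Nat) (memo : PySem.Dict Char Int),
        ((List.range m).map (fun i : Nat => (i : Int))).foldl
          (fun (st : Int × Int × Int × PySem.Dict Char Int) val =>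
            let ans := st.1; let dc := st.2.1; let rel := st.2.2.1; let memo := st.2.2.2
            let acq := (PySem.Str.pyGet? s val).getD ' '
            let p : Int × PySem.Dict Char Int :=
              if memo.contains acq then (dc, memo.insert acq (memo.getD acq 0 + 1))
              else (dc + 1, memo.insert acq 1)
            let r := pvAWhile s k val (val + 1 - rel).toNat p.1 rel p.2
            (ans + (val - r.2.1 + 1), r.1, r.2.1, r.2.2))
          (0, 0, 0, PySem.Dict.empty) =
          (pvSum s.toList k m, (pvND (pvSL s.toList R m) : Int), (R : Int), memo) ∧
        R ≤ m ∧ pvMSpec memo (pvSL s.toList R m) ∧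
        ((pvND (pvSL s.toList R m) : Int) ≤ k ∨ R = m) ∧
        (R = 0 ∨ k < (pvND (pvSL s.toList (R-1) m) : Int)) := by
  intro m
  induction m with
  | zero =>
    intro _
    refine ⟨0, PySem.Dict.empty, ?_, le_refl 0, ?_, Or.inr rfl, Or.inl rfl⟩
    · simp [pvSum, pvSL, pvND]
    · intro c; simp [pvSL, PySem.Dict.get?_empty]
  | succ m ih =>
    intro hm1
    have hm : m < s.toList.length := by omega
    obtain ⟨R, memo, hfold, hR, hms, _hdone, hmin⟩ := ih (by omega)
    rw [List.range_succ, List.map_append, List.foldl_append, hfold]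
    simp only [List.map_cons, List.map_nil, List.foldl_cons, List.foldl_nil]
    have hacq : (PySem.Str.pyGet? s ((m : Nat) : Int)).getD ' ' = s.toList[m] := pvStrGet s m hm
    have happ : pvSL s.toList R (m+1) = pvSL s.toList R m ++ [s.toList[m]] :=
      pvSL_succ_right s.toList hR hm
    have hmin1 : (R = 0 ∨ k < (pvND (pvSL s.toList (R-1) (m+1)) : Int)) := by
      rcases hmin with rfl | hmin
      · exact Or.inl rfl
      · right
        have hsub : pvND (pvSL s.toList (R-1) m) ≤ pvND (pvSL s.toList (R-1) (m+1)) := by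
          apply pvND_mono
          rw [pvSL_succ_right s.toList (by omega) hm]
          exact List.subset_append_left _ _
        exact lt_of_lt_of_le hmin (by exact_mod_cast hsub)
    have hcont : memo.contains ((PySem.Str.pyGet? s ((m : Nat) : Int)).getD ' ') =
        decide (s.toList[m] ∈ pvSL s.toList R m) := by
      rw [hacq]; exact pvMSpec_contains hms _
    by_cases hmem : s.toList[m] ∈ pvSL s.toList R m
    · -- char already in the window
      have hdc1 : (pvND (pvSL s.toList R m) : Int) = (pvND (pvSL s.toList R (m+1)) : Int) := by
        rw [happ, pvND_append_mem hmem]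
      have hms1 : pvMSpec (memo.insert ((PySem.Str.pyGet? s ((m : Nat) : Int)).getD ' ')
          (memo.getD ((PySem.Str.pyGet? s ((m : Nat) : Int)).getD ' ') 0 + 1)) (pvSL s.toList R (m+1)) := by
        rw [hacq]
        intro c
        by_cases hc : c = s.toList[m]
        · subst hc
          rw [PySem.Dict.get?_insert_self, pvMSpec_getD hms _ hmem, happ]
          simp [List.count_append]
        · rw [PySem.Dict.get?_insert_of_ne _ _ hc, hms c, happ]
          simp [List.count_append, Ne.symm hc]
      rw [hcont, if_pos (by simpa using hmem)]
      dsimp only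
      have hfuel : (((m : Nat) : Int) + 1 - (R : Int)).toNat = (m+1) - R := by omega
      rw [hfuel]
      obtain ⟨R', hWeq, hR', hms', hle', hmin'⟩ :=
        pvAWhile_eq s k m hm ((m+1) - R) _ R
          (memo.insert ((PySem.Str.pyGet? s ((m : Nat) : Int)).getD ' ')
            (memo.getD ((PySem.Str.pyGet? s ((m : Nat) : Int)).getD ' ') 0 + 1))
          (by omega) rfl hdc1 hms1 hmin1
      refine ⟨R', _, ?_, hR', hms', hle', hmin'⟩
      rw [hWeq]
      dsimp only
      rw [pvSum_succ, ← pvContrib s.toList k m R' hR' hle' hmin']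
    · -- new char for the window
      have hdc1 : (pvND (pvSL s.toList R m) : Int) + 1 = (pvND (pvSL s.toList R (m+1)) : Int) := by
        rw [happ, pvND_append_not_mem hmem]; push_cast; ring
      have hms1 : pvMSpec (memo.insert ((PySem.Str.pyGet? s ((m : Nat) : Int)).getD ' ') 1)
          (pvSL s.toList R (m+1)) := by
        rw [hacq]
        intro c
        by_cases hc : c = s.toList[m]
        · subst hc
          rw [PySem.Dict.get?_insert_self, happ]
          simp [List.count_eq_zero.mpr hmem]
        · rw [PySem.Dict.get?_insert_of_ne _ _ hc, hms c, happ]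
          simp [List.count_append, Ne.symm hc]
      rw [hcont, if_neg (by simpa using hmem)]
      dsimp only
      have hfuel : (((m : Nat) : Int) + 1 - (R : Int)).toNat = (m+1) - R := by omega
      rw [hfuel]
      obtain ⟨R', hWeq, hR', hms', hle', hmin'⟩ :=
        pvAWhile_eq s k m hm ((m+1) - R) _ R
          (memo.insert ((PySem.Str.pyGet? s ((m : Nat) : Int)).getD ' ') 1)
          (by omega) rfl hdc1 hms1 hmin1
      refine ⟨R', _, ?_, hR', hms', hle', hmin'⟩
      rw [hWeq]
      dsimp only
      rw [pvSum_succ, ← pvContrib s.toList k m R' hR' hle' hmin']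


theorem pvA_eq_sum (s : String) (k : Int) :
    AtmostKUniqueChar s k = pvSum s.toList k s.toList.length := by
  obtain ⟨R, memo, hfold, -, -, -, -⟩ := pvAFold s k s.toList.length (le_refl _)
  unfold AtmostKUniqueChar
  have hrange : PySem.List.pyRange 0 (PySem.Str.len s) 1 =
      (List.range s.toList.length).map (fun i : Nat => (i : Int)) := by
    rw [show PySem.Str.len s = ((s.toList.length : Nat) : Int) from rfl, PySem.List.pyRange_one]
    simp
  dsimp only
  rw [hrange, hfold]

theorem pvB_eq_sum (s : String) (k : Int) :
    AtmostKUniqueChar_alt s k = pvSum s.toList k s.toList.length := by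
  unfold AtmostKUniqueChar_alt
  rw [show PySem.Str.len s = ((s.toList.length : Nat) : Int) from rfl, PySem.List.pyRange_one]
  have hcast : ((List.range ((((s.toList.length : Nat) : Int)) - 0).toNat).map
      (fun kk : Nat => (0 : Int) + (kk : Int))) = (List.range s.toList.length).map (fun i : Nat => (i : Int)) := by
    simp
  rw [hcast]
  suffices h : ∀ m : Nat, m ≤ s.toList.length →
      ((List.range m).map (fun i : Nat => (i : Int))).foldl
        (fun ans j => ans + pvBWhile s k (j + 1).toNat j PySem.Set.empty) 0 = pvSum s.toList k m by
    exact h s.toList.length (le_refl _)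
  intro m
  induction m with
  | zero => intro _; simp [pvSum]
  | succ m ihm =>
    intro hm1
    rw [List.range_succ, List.map_append, List.foldl_append, ihm (by omega)]
    simp only [List.map_cons, List.map_nil, List.foldl_cons, List.foldl_nil]
    have h1 : (((m : Nat) : Int) + 1).toNat = m + 1 := by omega
    have h2 : ((m : Nat) : Int) = (((m+1 : Nat) : Int)) - 1 := by push_cast; ring
    rw [h1, h2, pvBWhile_eq s k (m+1) (by omega) (m+1) PySem.Set.empty (le_refl _)
      List.nodup_nil (by rw [pvSL_self]; rfl)]
    rw [pvSum_succ]
    rfl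

-- ===== VERDICT (by name: the statement is the Claim_ definition above) =====
theorem AtmostKUniqueChar_spec : Claim_equal_AtmostKUniqueChar := by
  intro s k _
  unfold Spec_AtmostKUniqueChar
  rw [pvA_eq_sum, pvB_eq_sum]
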